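-- pv_equiv track=rewrite | github.com/Aikiooo/7dsGems | 7dsGems.py | monthlyCalc
-- ===== SOURCE A (Python) =====
-- def monthlyCalc(boolMontly, days, startingDayMonthly):
--     if not boolMontly:
--         return 0
--
--     if boolMontly:
--         gemsFromMonthly = 0
--         iterations = 0
--         day = startingDayMonthly
--
--         while iterations < days:
--             gemsFromMonthly += 5
--             day += 1
--             if day > 28:
--                 gemsFromMonthly += 30
--                 day = 1
--             iterations += 1
--         return gemsFromMonthly
-- ===== SOURCE B (Python) =====
-- def monthlyCalc(boolMontly, days, startingDayMonthly):
--     if not boolMontly or days <= 0: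
--         return 0
--     first = max(29 - startingDayMonthly, 1)
--     wraps = 0 if days < first else 1 + (days - first) // 28
--     return 5 * days + 30 * wraps
-- ===== Notes on version B (the rewrite author's own statement) =====
-- stated objective: faster
-- what changed: Replaced the per-day accumulation loop with a closed form: 5*days plus 30 times the number of 28-day wraps computed arithmetically (distance to first wrap, then integer division by 28).
import Mathlib
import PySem

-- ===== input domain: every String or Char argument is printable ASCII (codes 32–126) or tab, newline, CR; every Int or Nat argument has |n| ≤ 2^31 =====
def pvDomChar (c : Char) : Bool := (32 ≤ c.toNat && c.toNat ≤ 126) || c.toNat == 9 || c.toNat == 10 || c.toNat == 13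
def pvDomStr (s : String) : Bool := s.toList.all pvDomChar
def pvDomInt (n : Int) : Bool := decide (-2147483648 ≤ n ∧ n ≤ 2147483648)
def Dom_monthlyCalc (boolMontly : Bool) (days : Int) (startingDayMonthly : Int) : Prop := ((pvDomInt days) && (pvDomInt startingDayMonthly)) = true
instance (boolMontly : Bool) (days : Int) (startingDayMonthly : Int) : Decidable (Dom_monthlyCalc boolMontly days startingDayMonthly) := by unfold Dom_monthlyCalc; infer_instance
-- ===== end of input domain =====

-- B replaces A's per-day loop by an O(1) closed form (5*days + 30*wraps via integer division).

-- ===== PORT A =====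
-- the while loop runs exactly max(days,0) times (iterations counts 0..days-1)
def monthlyCalcLoop : Nat → Int → Int → Int
  | 0, gemsFromMonthly, _ => gemsFromMonthly
  | n + 1, gemsFromMonthly, day =>
      let gemsFromMonthly := gemsFromMonthly + 5
      let day := day + 1
      if day > 28 then monthlyCalcLoop n (gemsFromMonthly + 30) 1
      else monthlyCalcLoop n gemsFromMonthly day

def monthlyCalc (boolMontly : Bool) (days : Int) (startingDayMonthly : Int) : Int :=
  if !boolMontly then 0
  else monthlyCalcLoop days.toNat 0 startingDayMonthly

-- ===== PORT B =====
def monthlyCalc_alt (boolMontly : Bool) (days : Int) (startingDayMonthly : Int) : Int :=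
  if !boolMontly || days ≤ 0 then 0
  else
    let first := max (29 - startingDayMonthly) 1
    let wraps := if days < first then 0 else 1 + PySem.Int.floordiv (days - first) 28
    5 * days + 30 * wraps

-- ===== PRECONDITION & SPEC =====
def Spec_monthlyCalc (boolMontly : Bool) (days : Int) (startingDayMonthly : Int) (out : Int) : Prop := out = monthlyCalc_alt boolMontly days startingDayMonthly
instance (boolMontly : Bool) (days : Int) (startingDayMonthly : Int) (out : Int) : Decidable (Spec_monthlyCalc boolMontly days startingDayMonthly out) := by unfold Spec_monthlyCalc; infer_instance

-- ===== CLAIM (what is proved, stated in full; the proofs are below) =====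
def Claim_equal_monthlyCalc : Prop := ∀ (boolMontly : Bool) (days : Int) (startingDayMonthly : Int), Dom_monthlyCalc boolMontly days startingDayMonthly → Spec_monthlyCalc boolMontly days startingDayMonthly (monthlyCalc boolMontly days startingDayMonthly)

-- ===== LEMMAS AND PROOFS =====

-- closed form for the wrap count starting from day `d` with `n` iterations left
def wrapsFrom (n : Nat) (d : Int) : Int :=
  let first := max (29 - d) 1
  if (n : Int) < first then 0 else 1 + ((n : Int) - first) / 28

theorem monthlyCalcLoop_eq (n : Nat) : ∀ (g d : Int),
    monthlyCalcLoop n g d = g + 5 * n + 30 * wrapsFrom n d := by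
  induction n with
  | zero =>
    intro g d
    simp [monthlyCalcLoop, wrapsFrom]
  | succ n ih =>
    intro g d
    by_cases h : d + 1 > 28
    · have : monthlyCalcLoop (n + 1) g d = monthlyCalcLoop n (g + 5 + 30) 1 := by
        simp [monthlyCalcLoop, h]
      rw [this, ih]
      simp only [wrapsFrom]
      push_cast
      omega
    · have : monthlyCalcLoop (n + 1) g d = monthlyCalcLoop n (g + 5) (d + 1) := by
        simp [monthlyCalcLoop, h]
      rw [this, ih]
      simp only [wrapsFrom]
      push_cast
      omega

-- ===== VERDICT (by name: the statement is the Claim_ definition above) =====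
theorem monthlyCalc_spec : Claim_equal_monthlyCalc := by
  intro b days d0 _
  unfold Spec_monthlyCalc monthlyCalc monthlyCalc_alt
  cases b with
  | false => simp
  | true =>
    simp only [Bool.not_true, Bool.false_or, if_neg (by simp : ¬ (false = true))]
    by_cases hd : days ≤ 0
    · have : days.toNat = 0 := by omega
      simp [this, monthlyCalcLoop, hd]
    · rw [monthlyCalcLoop_eq, PySem.Int.floordiv_eq_ediv_of_pos (by omega)]
      have h1 : ((days.toNat : Int)) = days := by omega
      simp only [wrapsFrom, h1, decide_eq_true_eq, if_neg hd]
      split_ifs <;> omega
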